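-- pv_equiv track=rewrite | github.com/rhkdguskim/Study | algorithm/이것이코딩테스트다스터디/다이나믹프로그래밍/N으로표현.py | solution
-- ===== SOURCE A (Python) =====
-- import heapq
--
-- def solution(N, number):
--     queue = []
--     result = -1
--     numstr = ''
--     for i in range(1, 10):
--         numstr += str(N)
--         heapq.heappush(queue, [i, int(numstr)])
--
--     while queue:
--         depth, now = heapq.heappop(queue)
--         if number == now or depth == 9:
--             if depth == 9:
--                 result = -1
--             else :
--                 result = depth
--             break
--         heapq.heappush(queue, [depth+1, now+N])
--         heapq.heappush(queue, [depth+1, now-N])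
--         heapq.heappush(queue, [depth+1, now*N])
--         heapq.heappush(queue, [depth+1, now//N])
--
--     return result
-- ===== SOURCE B (Python) =====
-- def solution(N, number):
--     # Level-by-level BFS with deduplicated sets instead of a heap with
--     # re-expanded duplicate states.
--     level = {int(str(N))}
--     for d in range(1, 9):
--         if number in level:
--             return d
--         level = ({x + N for x in level} | {x - N for x in level}
--                  | {x * N for x in level} | {x // N for x in level}
--                  | {int(str(N) * (d + 1))})
--     return -1
-- ===== Notes on version B (the rewrite author's own statement) =====
-- stated objective: faster
-- what changed: Replaces the heap-ordered search that re-expands duplicate (depth,value) states with a level-by-level BFS over deduplicated sets of reachable values, one membership check per depth.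
import Mathlib
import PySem

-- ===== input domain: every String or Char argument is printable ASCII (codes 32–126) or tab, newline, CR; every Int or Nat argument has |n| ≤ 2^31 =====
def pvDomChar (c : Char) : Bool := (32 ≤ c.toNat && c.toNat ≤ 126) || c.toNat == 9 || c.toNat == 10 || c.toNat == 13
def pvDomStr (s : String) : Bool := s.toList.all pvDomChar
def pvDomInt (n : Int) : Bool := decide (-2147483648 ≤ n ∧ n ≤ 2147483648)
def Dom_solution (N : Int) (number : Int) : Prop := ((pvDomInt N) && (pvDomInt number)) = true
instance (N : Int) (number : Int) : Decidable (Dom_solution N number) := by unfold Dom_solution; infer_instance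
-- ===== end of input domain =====

-- B replaces A's heap search (which re-expands duplicate states) by a level-by-level
-- BFS over deduplicated sets of reachable values; measurably faster on large searches.

-- ===== PORT A =====
-- heapq on [depth, now] lists: ported as a skew-heap priority queue ordered by the
-- same lexicographic order Python's heap pops by (duplicate entries are
-- indistinguishable, so the sequence of popped values is exactly Python's).
def pvLeB (a b : Int × Int) : Bool := a.1 < b.1 || (a.1 == b.1 && a.2 ≤ b.2)

inductive PvHeap where
  | nil : PvHeap
  | node : Int × Int → PvHeap → PvHeap → PvHeap

def PvHeap.size : PvHeap → Nat
  | .nil => 0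
  | .node _ l r => l.size + r.size + 1

def pvMerge : PvHeap → PvHeap → PvHeap
  | .nil, h => h
  | .node x l r, .nil => .node x l r
  | .node x l r, .node y l' r' =>
    if pvLeB x y then .node x (pvMerge r (.node y l' r')) l
    else .node y (pvMerge r' (.node x l r)) l'
termination_by a b => a.size + b.size
decreasing_by
  all_goals simp [PvHeap.size]
  all_goals omega

-- heapq.heappush
def pvHeapPush (h : PvHeap) (p : Int × Int) : PvHeap :=
  pvMerge h (.node p .nil .nil)

-- the seeding for-loop: numstr += str(N); heappush(queue, [i, int(numstr)])
def pvSeeds (N : Int) : String × PvHeap :=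
  (PySem.List.pyRange 1 10 1).foldl
    (fun st i =>
      let numstr := st.1 ++ PySem.Int.toStr N
      (numstr, pvHeapPush st.2 (i, (PySem.Int.ofStr? numstr).getD 0)))
    ("", .nil)

-- the while-loop (heappop = root; rest = merge of the children); the fuel guard only
-- makes the same computation total (5^9 exceeds the weighted queue size, proved
-- below; the 0-fuel branch is never reached).
def pvLoopA (N number : Int) : Nat → PvHeap → Int
  | _, .nil => -1
  | 0, .node _ _ _ => -1
  | fuel+1, .node (d, n) l r =>
    if number == n || d == 9 then (if d == 9 then (-1) else d)
    else pvLoopA N number fuel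
      (pvHeapPush (pvHeapPush (pvHeapPush (pvHeapPush (pvMerge l r) (d+1, n+N)) (d+1, n-N))
        (d+1, n*N)) (d+1, PySem.Int.floordiv n N))

def solution (N : Int) (number : Int) : Int :=
  pvLoopA N number 1953125 (pvSeeds N).2

-- ===== PORT B =====
-- str(N) * k
def pvStrRep (N : Int) : Nat → String
  | 0 => ""
  | k+1 => pvStrRep N k ++ PySem.Int.toStr N

-- {x+N for x in level} | {x-N for x in level} | {x*N for x in level} | {x//N for x in level} | {rep}
def pvExpand (N : Int) (level : PySem.Set Int) (rep : Int) : PySem.Set Int :=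
  PySem.Set.union (PySem.Set.union (PySem.Set.union (PySem.Set.union
    (PySem.Set.ofList (level.map (fun x => x + N)))
    (PySem.Set.ofList (level.map (fun x => x - N))))
    (PySem.Set.ofList (level.map (fun x => x * N))))
    (PySem.Set.ofList (level.map (fun x => PySem.Int.floordiv x N))))
    (PySem.Set.ofList [rep])

-- for d in range(1, 9): if number in level: return d; level = …
def pvLoopB (N number : Int) : List Int → PySem.Set Int → Int
  | [], _ => -1
  | d :: ds, level =>
    if PySem.Set.contains level number then d
    else pvLoopB N number ds
      (pvExpand N level ((PySem.Int.ofStr? (pvStrRep N (d + 1).toNat)).getD 0))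

def solution_alt (N : Int) (number : Int) : Int :=
  pvLoopB N number (PySem.List.pyRange 1 9 1)
    (PySem.Set.ofList [(PySem.Int.ofStr? (PySem.Int.toStr N)).getD 0])

-- ===== PRECONDITION & SPEC =====
-- Pre_ excludes exactly the inputs where the Python A raises: N < 0 (ValueError from
-- int(str(N)+str(N))) and N = 0 with number ≠ 0 (ZeroDivisionError from now//N).
def Pre_solution (N : Int) (number : Int) : Prop := 1 ≤ N ∨ (N = 0 ∧ number = 0)
instance (N : Int) (number : Int) : Decidable (Pre_solution N number) := by unfold Pre_solution; infer_instance
def pvWitness_solution : Int × Int := (2, 10)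

def Spec_solution (N : Int) (number : Int) (out : Int) : Prop := out = solution_alt N number
instance (N : Int) (number : Int) (out : Int) : Decidable (Spec_solution N number out) := by unfold Spec_solution; infer_instance

-- ===== CLAIM (what is proved, stated in full; the proofs are below) =====
def Claim_equal_solution : Prop := ∀ (N : Int) (number : Int), Dom_solution N number → Pre_solution N number → Spec_solution N number (solution N number)

-- ===== LEMMAS AND PROOFS =====

-- weight of a queue entry / of the queue, for the fuel induction
def pvW (p : Int × Int) : Nat := 5 ^ ((9 - p.1).toNat)

def pvMsrH : PvHeap → Nat
  | .nil => 0
  | .node x l r => pvW x + pvMsrH l + pvMsrH r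

def pvMemH : PvHeap → (Int × Int) → Prop
  | .nil, _ => False
  | .node x l r, p => p = x ∨ pvMemH l p ∨ pvMemH r p

def pvAnyH : PvHeap → (Int × Int → Bool) → Bool
  | .nil, _ => false
  | .node x l r, f => f x || (pvAnyH l f || pvAnyH r f)

def pvIsHeap : PvHeap → Prop
  | .nil => True
  | .node x l r => pvIsHeap l ∧ pvIsHeap r ∧
      (∀ y, pvMemH l y ∨ pvMemH r y → pvLeB x y = true)

-- all values reachable from n in exactly k expansion steps
def pvExpList (N : Int) : Nat → Int → List Int
  | 0, n => [n]
  | k+1, n => pvExpList N k (n + N) ++ pvExpList N k (n - N) ++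
      pvExpList N k (n * N) ++ pvExpList N k (PySem.Int.floordiv n N)

-- "queue entry p can reach number at total depth d"
def pvHit (N number d : Int) (p : Int × Int) : Bool :=
  decide (p.1 ≤ d ∧ number ∈ pvExpList N (d - p.1).toNat p.2)

-- first depth in l at which the depth predicate g holds
def pvFirstHit (g : Int → Bool) : List Int → Int
  | [] => -1
  | d :: ds => if g d then d else pvFirstHit g ds

def pvRv (N : Int) (i : Nat) : Int := (PySem.Int.ofStr? (pvStrRep N i)).getD 0

def pvSeedsL (N : Int) : List (Int × Int) :=
  [(1, pvRv N 1), (2, pvRv N 2), (3, pvRv N 3), (4, pvRv N 4), (5, pvRv N 5),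
   (6, pvRv N 6), (7, pvRv N 7), (8, pvRv N 8), (9, pvRv N 9)]

-- level sets of B, as lists: pvLvl N k = values reachable at depth k+1
def pvLvl (N : Int) : Nat → List Int
  | 0 => [pvRv N 1]
  | k+1 => (pvLvl N k).map (fun x => x + N) ++ (pvLvl N k).map (fun x => x - N) ++
      (pvLvl N k).map (fun x => x * N) ++ (pvLvl N k).map (fun x => PySem.Int.floordiv x N) ++
      [pvRv N (k+2)]

theorem pvLeB_total (a b : Int × Int) (h : pvLeB a b = false) : pvLeB b a = true := by
  simp [pvLeB] at *; omega

theorem pvLeB_trans (a b c : Int × Int) (h1 : pvLeB a b = true) (h2 : pvLeB b c = true) :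
    pvLeB a c = true := by
  simp [pvLeB] at *; omega

theorem pvLeB_refl (a : Int × Int) : pvLeB a a = true := by
  simp [pvLeB]

theorem mem_pvMerge (a b : PvHeap) (x : Int × Int) :
    pvMemH (pvMerge a b) x ↔ pvMemH a x ∨ pvMemH b x := by
  induction a, b using pvMerge.induct with
  | case1 h => simp [pvMerge, pvMemH]
  | case2 y l r => simp [pvMerge, pvMemH]
  | case3 y l r z l' r' hle ih =>
    rw [pvMerge, if_pos hle]
    simp only [pvMemH, ih]
    tauto
  | case4 y l r z l' r' hle ih =>
    rw [pvMerge, if_neg (by simp [hle])]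
    simp only [pvMemH, ih]
    tauto

theorem heap_pvMerge (a b : PvHeap) (ha : pvIsHeap a) (hb : pvIsHeap b) :
    pvIsHeap (pvMerge a b) := by
  induction a, b using pvMerge.induct with
  | case1 h => simpa [pvMerge] using hb
  | case2 y l r => simpa [pvMerge] using ha
  | case3 y l r z l' r' hle ih =>
    rw [pvMerge, if_pos hle]
    obtain ⟨hal, har, hroot⟩ := ha
    refine ⟨ih har hb, hal, ?_⟩
    intro p hp
    rcases hp with hp | hp
    · rw [mem_pvMerge] at hp
      rcases hp with hp | hp
      · exact hroot p (Or.inr hp)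
      · rcases hp with rfl | hp | hp
        · exact hle
        · exact pvLeB_trans _ _ _ hle (hb.2.2 p (Or.inl hp))
        · exact pvLeB_trans _ _ _ hle (hb.2.2 p (Or.inr hp))
    · exact hroot p (Or.inl hp)
  | case4 y l r z l' r' hle ih =>
    rw [pvMerge, if_neg (by simp [hle])]
    obtain ⟨hbl, hbr, hroot⟩ := hb
    have hzy : pvLeB z y = true := pvLeB_total _ _ (Bool.not_eq_true _ ▸ hle)
    refine ⟨ih hbr ha, hbl, ?_⟩
    intro p hp
    rcases hp with hp | hp
    · rw [mem_pvMerge] at hp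
      rcases hp with hp | hp
      · exact hroot p (Or.inr hp)
      · rcases hp with rfl | hp | hp
        · exact hzy
        · exact pvLeB_trans _ _ _ hzy (ha.2.2 p (Or.inl hp))
        · exact pvLeB_trans _ _ _ hzy (ha.2.2 p (Or.inr hp))
    · exact hroot p (Or.inl hp)

theorem msr_pvMerge (a b : PvHeap) : pvMsrH (pvMerge a b) = pvMsrH a + pvMsrH b := by
  induction a, b using pvMerge.induct with
  | case1 h => simp [pvMerge, pvMsrH]
  | case2 y l r => simp [pvMerge, pvMsrH]
  | case3 y l r z l' r' hle ih => rw [pvMerge, if_pos hle]; simp [pvMsrH, ih]; omega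
  | case4 y l r z l' r' hle ih =>
    rw [pvMerge, if_neg (by simp [hle])]; simp [pvMsrH, ih]; omega

theorem anyH_true_iff (h : PvHeap) (f : Int × Int → Bool) :
    pvAnyH h f = true ↔ ∃ p, pvMemH h p ∧ f p = true := by
  induction h with
  | nil => simp [pvAnyH, pvMemH]
  | node x l r ihl ihr =>
    simp only [pvAnyH, pvMemH, Bool.or_eq_true, ihl, ihr]
    constructor
    · rintro (hx | ⟨p, hp, hf⟩ | ⟨p, hp, hf⟩)
      · exact ⟨x, Or.inl rfl, hx⟩
      · exact ⟨p, Or.inr (Or.inl hp), hf⟩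
      · exact ⟨p, Or.inr (Or.inr hp), hf⟩
    · rintro ⟨p, rfl | hp | hp, hf⟩
      · exact Or.inl hf
      · exact Or.inr (Or.inl ⟨p, hp, hf⟩)
      · exact Or.inr (Or.inr ⟨p, hp, hf⟩)

theorem mem_pvHeapPush (h : PvHeap) (p x : Int × Int) :
    pvMemH (pvHeapPush h p) x ↔ x = p ∨ pvMemH h x := by
  rw [pvHeapPush, mem_pvMerge]
  simp [pvMemH]
  tauto

theorem heap_pvHeapPush (h : PvHeap) (p : Int × Int) (hh : pvIsHeap h) :
    pvIsHeap (pvHeapPush h p) := by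
  refine heap_pvMerge _ _ hh ?_
  exact ⟨trivial, trivial, by intro y hy; simp [pvMemH] at hy⟩

theorem msr_pvHeapPush (h : PvHeap) (p : Int × Int) :
    pvMsrH (pvHeapPush h p) = pvW p + pvMsrH h := by
  rw [pvHeapPush, msr_pvMerge]; simp [pvMsrH]; omega

theorem anyH_pvHeapPush (h : PvHeap) (p : Int × Int) (f : Int × Int → Bool) :
    pvAnyH (pvHeapPush h p) f = (f p || pvAnyH h f) := by
  rw [Bool.eq_iff_iff]
  simp only [anyH_true_iff, Bool.or_eq_true, mem_pvHeapPush]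
  constructor
  · rintro ⟨q, rfl | hq, hf⟩
    · exact Or.inl hf
    · exact Or.inr ⟨q, hq, hf⟩
  · rintro (hf | ⟨q, hq, hf⟩)
    · exact ⟨p, Or.inl rfl, hf⟩
    · exact ⟨q, Or.inr hq, hf⟩

theorem root_le_all (x : Int × Int) (l r : PvHeap) (hh : pvIsHeap (.node x l r))
    (y : Int × Int) (hy : pvMemH (.node x l r) y) : pvLeB x y = true := by
  rcases hy with rfl | hy | hy
  · exact pvLeB_refl _
  · exact hh.2.2 y (Or.inl hy)
  · exact hh.2.2 y (Or.inr hy)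

theorem pvFirstHit_congr (g g' : Int → Bool) (l : List Int)
    (h : ∀ d ∈ l, g' d = g d) :
    pvFirstHit g' l = pvFirstHit g l := by
  induction l with
  | nil => rfl
  | cons d ds ih =>
    simp only [pvFirstHit, h d (by simp)]
    split
    · rfl
    · exact ih (fun d' hd' => h d' (by simp [hd']))

theorem pvFirstHit_all_false (g : Int → Bool) (l : List Int)
    (h : ∀ d ∈ l, g d = false) :
    pvFirstHit g l = -1 := by
  induction l with
  | nil => rfl
  | cons d ds ih =>
    rw [pvFirstHit, if_neg (by simp [h d (by simp)])]
    exact ih (fun d' hd' => h d' (by simp [hd']))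

theorem pvFirstHit_finds (g : Int → Bool) (d : Int) :
    ∀ l : List Int, List.Pairwise (· < ·) l → d ∈ l →
    (∀ d' < d, g d' = false) → g d = true →
    pvFirstHit g l = d := by
  intro l
  induction l with
  | nil => simp
  | cons x xs ih =>
    intro hp hm hlt hd
    rw [List.pairwise_cons] at hp
    rcases List.mem_cons.1 hm with rfl | hm
    · rw [pvFirstHit, if_pos (by simp [hd])]
    · have hx : x < d := hp.1 d hm
      rw [pvFirstHit, if_neg (by simp [hlt x hx])]
      exact ih hp.2 hm hlt hd

theorem pvHit_true_iff (N number d : Int) (p : Int × Int) :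
    pvHit N number d p = true ↔ p.1 ≤ d ∧ number ∈ pvExpList N (d - p.1).toNat p.2 := by
  simp [pvHit]

-- the children of a popped entry reach exactly what the entry reached (apart from
-- the entry's own value, which is not `number` in the recursive case)
theorem pvHit_children (N number d₀ n : Int) (hn : number ≠ n) (d : Int) :
    (pvHit N number d (d₀+1, n+N) || pvHit N number d (d₀+1, n-N) ||
     pvHit N number d (d₀+1, n*N) || pvHit N number d (d₀+1, PySem.Int.floordiv n N)) =
    pvHit N number d (d₀, n) := by
  rcases lt_trichotomy d d₀ with hlt | rfl | hgt
  · have h1 : ¬ (d₀ + 1 ≤ d) := by omega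
    have h2 : ¬ (d₀ ≤ d) := by omega
    simp [pvHit, h1, h2]
  · have h1 : ¬ (d + 1 ≤ d) := by omega
    have h2 : (d - d : Int).toNat = 0 := by omega
    simp [pvHit, h1, h2, pvExpList, hn]
  · have h1 : d₀ + 1 ≤ d := by omega
    have h2 : d₀ ≤ d := by omega
    have h3 : (d - d₀).toNat = (d - (d₀ + 1)).toNat + 1 := by omega
    rw [Bool.eq_iff_iff]
    simp [pvHit, h1, h2, h3, pvExpList]
    tauto

-- ===== A-side main lemma =====
theorem pvLoopA_eq (N number : Int) : ∀ (fuel : Nat) (q : PvHeap),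
    pvIsHeap q → (∀ p, pvMemH q p → 1 ≤ p.1 ∧ p.1 ≤ 9) → pvMsrH q ≤ fuel →
    pvLoopA N number fuel q
      = pvFirstHit (fun d' => pvAnyH q (pvHit N number d')) (PySem.List.pyRange 1 9 1) := by
  intro fuel
  induction fuel with
  | zero =>
    intro q ho hb hm
    match q with
    | .nil => rw [pvLoopA]; exact (pvFirstHit_all_false _ _ (fun d _ => rfl)).symm
    | .node p l r =>
      exfalso
      have h1 : 1 ≤ pvW p := Nat.one_le_pow _ _ (by norm_num)
      simp [pvMsrH] at hm
      omega
  | succ fuel ih =>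
    intro q ho hb hm
    match q with
    | .nil => rw [pvLoopA]; exact (pvFirstHit_all_false _ _ (fun d _ => rfl)).symm
    | .node (d, n) l r =>
      rw [pvLoopA]
      by_cases h9 : d = 9
      · subst h9
        rw [if_pos (by simp), if_pos (by simp)]
        symm
        apply pvFirstHit_all_false
        intro d' hd'
        have hd'8 : d' < 9 := (PySem.List.mem_pyRange_one.1 hd').2
        rw [← Bool.not_eq_true, anyH_true_iff]
        rintro ⟨p, hp, hhit⟩
        rw [pvHit_true_iff] at hhit
        have := root_le_all _ _ _ ho p hp
        simp [pvLeB] at this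
        omega
      · by_cases hn : number = n
        · subst hn
          rw [if_pos (by simp), if_neg (by simpa using h9)]
          obtain ⟨hd1, hd9⟩ := hb (d, number) (Or.inl rfl)
          symm
          apply pvFirstHit_finds
          · exact PySem.List.pairwise_lt_pyRange_one 1 9
          · rw [PySem.List.mem_pyRange_one]; omega
          · intro d' hd'
            rw [← Bool.not_eq_true, anyH_true_iff]
            rintro ⟨p, hp, hhit⟩
            rw [pvHit_true_iff] at hhit
            have := root_le_all _ _ _ ho p hp
            simp [pvLeB] at this
            omega
          · rw [anyH_true_iff]
            have hh : pvHit N number d (d, number) = true := by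
              rw [pvHit_true_iff]
              refine ⟨le_refl d, ?_⟩
              simp [pvExpList]
            exact ⟨(d, number), Or.inl rfl, hh⟩
        · rw [if_neg (by simp [hn, h9])]
          obtain ⟨hd1, hd9⟩ := hb (d, n) (Or.inl rfl)
          have hd8 : d ≤ 8 := by omega
          set rest := pvMerge l r with hrest
          set q' := pvHeapPush (pvHeapPush (pvHeapPush (pvHeapPush rest (d+1, n+N)) (d+1, n-N))
            (d+1, n*N)) (d+1, PySem.Int.floordiv n N) with hq'
          have hrestheap : pvIsHeap rest := heap_pvMerge _ _ ho.1 ho.2.1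
          have ho' : pvIsHeap q' := by
            apply heap_pvHeapPush; apply heap_pvHeapPush; apply heap_pvHeapPush
            exact heap_pvHeapPush _ _ hrestheap
          have hb' : ∀ p, pvMemH q' p → 1 ≤ p.1 ∧ p.1 ≤ 9 := by
            intro p hp
            simp only [hq', mem_pvHeapPush, hrest, mem_pvMerge] at hp
            rcases hp with rfl | rfl | rfl | rfl | hp | hp
            · exact (by omega : 1 ≤ d + 1 ∧ d + 1 ≤ 9)
            · exact (by omega : 1 ≤ d + 1 ∧ d + 1 ≤ 9)
            · exact (by omega : 1 ≤ d + 1 ∧ d + 1 ≤ 9)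
            · exact (by omega : 1 ≤ d + 1 ∧ d + 1 ≤ 9)
            · exact hb p (Or.inr (Or.inl hp))
            · exact hb p (Or.inr (Or.inr hp))
          have hm' : pvMsrH q' ≤ fuel := by
            have e : pvMsrH q' = pvMsrH rest + 4 * 5 ^ ((8 - d : Int)).toNat := by
              have e48 : ((9 - (d+1) : Int)).toNat = ((8 - d : Int)).toNat := by omega
              simp [hq', msr_pvHeapPush, pvW, e48]
              ring
            have e2 : pvMsrH (.node (d, n) l r)
                = 5 ^ ((9 - d : Int)).toNat + pvMsrH rest := by
              simp [pvMsrH, pvW, hrest, msr_pvMerge]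
              omega
            have e3 : ((9 - d : Int)).toNat = ((8 - d : Int)).toNat + 1 := by omega
            have h5 : 1 ≤ 5 ^ ((8 - d : Int)).toNat := Nat.one_le_pow _ _ (by norm_num)
            rw [e3, pow_succ] at e2
            omega
          rw [ih q' ho' hb' hm']
          apply pvFirstHit_congr
          intro d' hd'
          rw [hq', anyH_pvHeapPush, anyH_pvHeapPush, anyH_pvHeapPush, anyH_pvHeapPush]
          have hrhs : pvAnyH (.node (d, n) l r) (pvHit N number d')
              = (pvHit N number d' (d, n) || pvAnyH rest (pvHit N number d')) := by
            rw [pvAnyH, hrest]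
            rw [show pvAnyH (pvMerge l r) (pvHit N number d')
                = (pvAnyH l (pvHit N number d') || pvAnyH r (pvHit N number d')) from by
              rw [Bool.eq_iff_iff]
              simp only [anyH_true_iff, Bool.or_eq_true, mem_pvMerge]
              constructor
              · rintro ⟨p, hp | hp, hf⟩
                · exact Or.inl ⟨p, hp, hf⟩
                · exact Or.inr ⟨p, hp, hf⟩
              · rintro (⟨p, hp, hf⟩ | ⟨p, hp, hf⟩)
                · exact ⟨p, Or.inl hp, hf⟩
                · exact ⟨p, Or.inr hp, hf⟩]
          rw [hrhs, ← pvHit_children N number d n hn d']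
          cases pvHit N number d' (d+1, n+N) <;> cases pvHit N number d' (d+1, n-N) <;>
            cases pvHit N number d' (d+1, n*N) <;>
            cases pvHit N number d' (d+1, PySem.Int.floordiv n N) <;> simp

-- ===== seeds =====
theorem pyRange_1_10 : PySem.List.pyRange 1 10 1 = [1, 2, 3, 4, 5, 6, 7, 8, 9] := by
  decide

theorem mem_seedsH (N : Int) (p : Int × Int) :
    pvMemH (pvSeeds N).2 p ↔ p ∈ pvSeedsL N := by
  rw [pvSeeds, pyRange_1_10]
  simp only [List.foldl]
  simp only [mem_pvHeapPush, pvSeedsL, pvMemH, List.mem_cons, List.not_mem_nil,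
    pvRv, pvStrRep]
  tauto

theorem heap_seedsH (N : Int) : pvIsHeap (pvSeeds N).2 := by
  rw [pvSeeds, pyRange_1_10]
  simp only [List.foldl]
  apply heap_pvHeapPush; apply heap_pvHeapPush; apply heap_pvHeapPush; apply heap_pvHeapPush
  apply heap_pvHeapPush; apply heap_pvHeapPush; apply heap_pvHeapPush; apply heap_pvHeapPush
  apply heap_pvHeapPush
  trivial

theorem bounds_seedsH (N : Int) : ∀ p, pvMemH (pvSeeds N).2 p → 1 ≤ p.1 ∧ p.1 ≤ 9 := by
  intro p hp
  rw [mem_seedsH] at hp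
  fin_cases hp <;> norm_num

theorem msr_seedsH (N : Int) : pvMsrH (pvSeeds N).2 ≤ 1953125 := by
  rw [pvSeeds, pyRange_1_10]
  simp only [List.foldl]
  simp only [msr_pvHeapPush, pvMsrH, pvW]
  decide

theorem anyH_seeds_eq_any (N number d : Int) :
    pvAnyH (pvSeeds N).2 (pvHit N number d) = (pvSeedsL N).any (pvHit N number d) := by
  rw [Bool.eq_iff_iff, anyH_true_iff, List.any_eq_true]
  constructor
  · rintro ⟨p, hp, hf⟩
    exact ⟨p, (mem_seedsH N p).1 hp, hf⟩
  · rintro ⟨p, hp, hf⟩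
    exact ⟨p, (mem_seedsH N p).2 hp, hf⟩

-- ===== B-side lemmas =====
theorem mem_pvExpList_succ (N : Int) (m : Nat) (n x : Int) :
    x ∈ pvExpList N (m+1) n ↔
    ∃ y ∈ pvExpList N m n, x = y + N ∨ x = y - N ∨ x = y * N ∨ x = PySem.Int.floordiv y N := by
  induction m generalizing n with
  | zero => simp [pvExpList]
  | succ k ih =>
    constructor
    · intro hx
      rw [pvExpList] at hx
      simp only [List.mem_append] at hx
      rcases hx with ((h | h) | h) | h <;>
        · obtain ⟨y, hy, hp⟩ := (ih _).1 h
          refine ⟨y, ?_, hp⟩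
          rw [pvExpList]; simp only [List.mem_append]; tauto
    · rintro ⟨y, hy, hp⟩
      rw [pvExpList] at hy
      simp only [List.mem_append] at hy
      rw [pvExpList]; simp only [List.mem_append]
      rcases hy with ((h | h) | h) | h
      · exact Or.inl (Or.inl (Or.inl ((ih _).2 ⟨y, h, hp⟩)))
      · exact Or.inl (Or.inl (Or.inr ((ih _).2 ⟨y, h, hp⟩)))
      · exact Or.inl (Or.inr ((ih _).2 ⟨y, h, hp⟩))
      · exact Or.inr ((ih _).2 ⟨y, h, hp⟩)

theorem mem_pvLvl (N : Int) (k : Nat) (x : Int) :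
    x ∈ pvLvl N k ↔ ∃ i : Nat, 1 ≤ i ∧ i ≤ k + 1 ∧ x ∈ pvExpList N (k + 1 - i) (pvRv N i) := by
  induction k generalizing x with
  | zero =>
    simp only [pvLvl, List.mem_singleton]
    constructor
    · rintro rfl; exact ⟨1, by norm_num, by norm_num, by simp [pvExpList]⟩
    · rintro ⟨i, hi1, hi2, hm⟩
      have : i = 1 := by omega
      subst this
      simpa [pvExpList] using hm
  | succ k ih =>
    constructor
    · intro hx
      rw [pvLvl] at hx
      simp only [List.mem_append, List.mem_map, List.mem_singleton] at hx
      have push : ∀ (y : Int), y ∈ pvLvl N k →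
          (x = y + N ∨ x = y - N ∨ x = y * N ∨ x = PySem.Int.floordiv y N) →
          ∃ i : Nat, 1 ≤ i ∧ i ≤ k + 1 + 1 ∧ x ∈ pvExpList N (k + 1 + 1 - i) (pvRv N i) := by
        intro y hy hc
        obtain ⟨i, hi1, hi2, hm⟩ := (ih y).1 hy
        refine ⟨i, hi1, by omega, ?_⟩
        have e : k + 1 + 1 - i = (k + 1 - i) + 1 := by omega
        rw [e]
        exact (mem_pvExpList_succ N _ _ x).2 ⟨y, hm, hc⟩
      rcases hx with ((((⟨y, hy, hc⟩ | ⟨y, hy, hc⟩) | ⟨y, hy, hc⟩) | ⟨y, hy, hc⟩) | rfl)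
      · exact push y hy (Or.inl hc.symm)
      · exact push y hy (Or.inr (Or.inl hc.symm))
      · exact push y hy (Or.inr (Or.inr (Or.inl hc.symm)))
      · exact push y hy (Or.inr (Or.inr (Or.inr hc.symm)))
      · exact ⟨k + 2, by omega, by omega, by
          have e : k + 1 + 1 - (k + 2) = 0 := by omega
          rw [e]; simp [pvExpList]⟩
    · rintro ⟨i, hi1, hi2, hm⟩
      by_cases hik : i = k + 2
      · subst hik
        have e : k + 1 + 1 - (k + 2) = 0 := by omega
        rw [e] at hm
        simp only [pvExpList, List.mem_singleton] at hm
        subst hm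
        rw [pvLvl]
        simp
      · have hi2' : i ≤ k + 1 := by omega
        have e : k + 1 + 1 - i = (k + 1 - i) + 1 := by omega
        rw [e] at hm
        obtain ⟨y, hy, hc⟩ := (mem_pvExpList_succ N _ _ x).1 hm
        have hyl : y ∈ pvLvl N k := (ih y).2 ⟨i, hi1, hi2', hy⟩
        rw [pvLvl]
        simp only [List.mem_append, List.mem_map, List.mem_singleton]
        rcases hc with rfl | rfl | rfl | rfl
        · exact Or.inl (Or.inl (Or.inl (Or.inl ⟨y, hyl, rfl⟩)))
        · exact Or.inl (Or.inl (Or.inl (Or.inr ⟨y, hyl, rfl⟩)))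
        · exact Or.inl (Or.inl (Or.inr ⟨y, hyl, rfl⟩))
        · exact Or.inl (Or.inr ⟨y, hyl, rfl⟩)

theorem seeds_any_aux (N number d : Int) (j : Nat) (hj : 1 ≤ j) (h1 : 1 ≤ d)
    (hle : (j : Int) ≤ d) (hm : number ∈ pvExpList N (d - (j : Int)).toNat (pvRv N j)) :
    ∃ i : Nat, 1 ≤ i ∧ i ≤ (d - 1).toNat + 1 ∧
      number ∈ pvExpList N ((d - 1).toNat + 1 - i) (pvRv N i) := by
  refine ⟨j, hj, by omega, ?_⟩
  have e : (d - (j : Int)).toNat = (d - 1).toNat + 1 - j := by omega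
  rwa [e] at hm

theorem seeds_any_aux2 (N number d : Int) (j : Nat) (h1 : 1 ≤ d) (hj : (j : Int) ≤ d)
    (hm : number ∈ pvExpList N ((d - 1).toNat + 1 - j) (pvRv N j)) :
    pvHit N number d ((j : Int), pvRv N j) = true := by
  rw [pvHit_true_iff]
  refine ⟨hj, ?_⟩
  have e : (d - (j : Int)).toNat = (d - 1).toNat + 1 - j := by omega
  rw [e]
  exact hm

set_option maxHeartbeats 2000000 in
theorem seeds_any_hit (N number d : Int) (h1 : 1 ≤ d) (h8 : d ≤ 8) :
    (pvSeedsL N).any (pvHit N number d) = true ↔ number ∈ pvLvl N (d - 1).toNat := by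
  rw [mem_pvLvl, List.any_eq_true]
  constructor
  · rintro ⟨⟨p1, p2⟩, hp, hhit⟩
    rw [pvHit_true_iff] at hhit
    dsimp only at hhit
    obtain ⟨hle, hm⟩ := hhit
    simp only [pvSeedsL, List.mem_cons, List.not_mem_nil, or_false, Prod.mk.injEq] at hp
    rcases hp with h | h | h | h | h | h | h | h | h
    · rw [h.1] at hle
      rw [h.1, h.2] at hm
      refine seeds_any_aux N number d 1 (by norm_num) h1 (by exact_mod_cast hle) ?_
      have e : ((1:Nat) : Int) = (1:Int) := by norm_num
      rw [e]
      exact hm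
    · rw [h.1] at hle
      rw [h.1, h.2] at hm
      refine seeds_any_aux N number d 2 (by norm_num) h1 (by exact_mod_cast hle) ?_
      have e : ((2:Nat) : Int) = (2:Int) := by norm_num
      rw [e]
      exact hm
    · rw [h.1] at hle
      rw [h.1, h.2] at hm
      refine seeds_any_aux N number d 3 (by norm_num) h1 (by exact_mod_cast hle) ?_
      have e : ((3:Nat) : Int) = (3:Int) := by norm_num
      rw [e]
      exact hm
    · rw [h.1] at hle
      rw [h.1, h.2] at hm
      refine seeds_any_aux N number d 4 (by norm_num) h1 (by exact_mod_cast hle) ?_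
      have e : ((4:Nat) : Int) = (4:Int) := by norm_num
      rw [e]
      exact hm
    · rw [h.1] at hle
      rw [h.1, h.2] at hm
      refine seeds_any_aux N number d 5 (by norm_num) h1 (by exact_mod_cast hle) ?_
      have e : ((5:Nat) : Int) = (5:Int) := by norm_num
      rw [e]
      exact hm
    · rw [h.1] at hle
      rw [h.1, h.2] at hm
      refine seeds_any_aux N number d 6 (by norm_num) h1 (by exact_mod_cast hle) ?_
      have e : ((6:Nat) : Int) = (6:Int) := by norm_num
      rw [e]
      exact hm
    · rw [h.1] at hle
      rw [h.1, h.2] at hm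
      refine seeds_any_aux N number d 7 (by norm_num) h1 (by exact_mod_cast hle) ?_
      have e : ((7:Nat) : Int) = (7:Int) := by norm_num
      rw [e]
      exact hm
    · rw [h.1] at hle
      rw [h.1, h.2] at hm
      refine seeds_any_aux N number d 8 (by norm_num) h1 (by exact_mod_cast hle) ?_
      have e : ((8:Nat) : Int) = (8:Int) := by norm_num
      rw [e]
      exact hm
    · rw [h.1] at hle
      have h9d : ¬ (9 : Int) ≤ d := by omega
      exact absurd hle h9d
  · rintro ⟨i, hi1, hi2, hm⟩
    have hid : (i : Int) ≤ d := by omega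
    refine ⟨((i : Int), pvRv N i), ?_, seeds_any_aux2 N number d i h1 hid hm⟩
    have hi8 : i ≤ 8 := by omega
    interval_cases i <;> norm_num [pvSeedsL]

theorem mem_pvExpand (N : Int) (level : PySem.Set Int) (rep x : Int) :
    x ∈ pvExpand N level rep ↔
    (∃ y ∈ level, y + N = x ∨ y - N = x ∨ y * N = x ∨ PySem.Int.floordiv y N = x) ∨ x = rep := by
  simp [pvExpand, PySem.Set.mem_union, PySem.Set.mem_ofList, List.mem_map]
  aesop

theorem pvLoopB_eq (N number : Int) : ∀ (k : Nat) (d : Int) (level : PySem.Set Int),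
    d = 9 - (k : Int) → 1 ≤ d →
    (∀ x, x ∈ level ↔ x ∈ pvLvl N (d - 1).toNat) →
    pvLoopB N number (PySem.List.pyRange d 9 1) level =
      pvFirstHit (fun d' => (pvSeedsL N).any (pvHit N number d'))
        (PySem.List.pyRange d 9 1) := by
  intro k
  induction k with
  | zero =>
    intro d level hd h1 hinv
    have h9 : (9 : Int) ≤ d := by omega
    rw [PySem.List.pyRange_one_eq_nil h9]
    rfl
  | succ k ih =>
    intro d level hd h1 hinv
    have hd9 : d < 9 := by omega
    have h8 : d ≤ 8 := by omega
    rw [PySem.List.pyRange_one_cons hd9]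
    rw [pvLoopB]
    simp only [pvFirstHit]
    have hcond : PySem.Set.contains level number = (pvSeedsL N).any (pvHit N number d) := by
      rw [Bool.eq_iff_iff, PySem.Set.contains_iff, seeds_any_hit N number d h1 h8]
      exact hinv number
    rw [hcond]
    split
    · rfl
    · have e2 : (d + 1).toNat = (d - 1).toNat + 2 := by omega
      have erep : (PySem.Int.ofStr? (pvStrRep N (d + 1).toNat)).getD 0
          = pvRv N ((d - 1).toNat + 2) := by rw [pvRv, e2]
      rw [erep]
      apply ih (d + 1) _ (by omega) (by omega)
      intro x
      rw [mem_pvExpand]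
      have e1 : (d + 1 - 1).toNat = (d - 1).toNat + 1 := by omega
      rw [e1, pvLvl]
      simp only [List.mem_append, List.mem_map, List.mem_singleton, hinv]
      constructor
      · rintro (⟨y, hy, (rfl | rfl | rfl | rfl)⟩ | rfl)
        · exact Or.inl (Or.inl (Or.inl (Or.inl ⟨y, hy, rfl⟩)))
        · exact Or.inl (Or.inl (Or.inl (Or.inr ⟨y, hy, rfl⟩)))
        · exact Or.inl (Or.inl (Or.inr ⟨y, hy, rfl⟩))
        · exact Or.inl (Or.inr ⟨y, hy, rfl⟩)
        · exact Or.inr rfl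
      · rintro ((((⟨y, hy, rfl⟩ | ⟨y, hy, rfl⟩) | ⟨y, hy, rfl⟩) | ⟨y, hy, rfl⟩) | rfl)
        · exact Or.inl ⟨y, hy, Or.inl rfl⟩
        · exact Or.inl ⟨y, hy, Or.inr (Or.inl rfl)⟩
        · exact Or.inl ⟨y, hy, Or.inr (Or.inr (Or.inl rfl))⟩
        · exact Or.inl ⟨y, hy, Or.inr (Or.inr (Or.inr rfl))⟩
        · exact Or.inr rfl

theorem str_nil_append (s : String) : "" ++ s = s := rfl

-- ===== VERDICT (by name: the statement is the Claim_ definition above) =====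
theorem solution_spec : Claim_equal_solution := by
  intro N number _ _
  unfold Spec_solution solution solution_alt
  rw [pvLoopA_eq N number 1953125 (pvSeeds N).2 (heap_seedsH N) (bounds_seedsH N)
    (msr_seedsH N)]
  rw [pvFirstHit_congr _ _ _ (fun d' _ => anyH_seeds_eq_any N number d')]
  have hinv : ∀ x, x ∈ PySem.Set.ofList [(PySem.Int.ofStr? (PySem.Int.toStr N)).getD 0]
      ↔ x ∈ pvLvl N ((1 : Int) - 1).toNat := by
    intro x
    rw [PySem.Set.mem_ofList]
    norm_num [pvLvl, pvRv, pvStrRep, str_nil_append]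
  exact (pvLoopB_eq N number 8 1 _ (by norm_num) (by norm_num) hinv).symm
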